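-- pv_equiv track=rewrite | github.com/waitingtrees/raycast-scripts | split-svg-graphics.py | bands_from_gaps
-- ===== SOURCE A (Python) =====
-- def bands_from_gaps(gaps, total_len):
--     """Convert gap list into content bands."""
--     bands = []
--     prev_end = 0
--     for gap_start, gap_end in gaps:
--         if gap_start > prev_end:
--             bands.append((prev_end, gap_start))
--         prev_end = gap_end
--     if prev_end < total_len:
--         bands.append((prev_end, total_len))
--     return bands
-- ===== SOURCE B (Python) =====
-- def bands_from_gaps(gaps, total_len):
--     """Convert gap list into content bands (boundary-list + strided pairing)."""
--     pts = [0]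
--     for gap_start, gap_end in gaps:
--         pts.append(gap_start)
--         pts.append(gap_end)
--     pts.append(total_len)
--     return [(pts[i], pts[i + 1]) for i in range(0, len(pts), 2) if pts[i] < pts[i + 1]]
-- ===== Notes on version B (the rewrite author's own statement) =====
-- stated objective: alternative
-- what changed: B first materializes the flat boundary list [0, gs0, ge0, ..., total_len] and then emits bands in one strided pairing pass over even indices, instead of threading prev_end through an inline loop that appends conditionally.
import Mathlib
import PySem

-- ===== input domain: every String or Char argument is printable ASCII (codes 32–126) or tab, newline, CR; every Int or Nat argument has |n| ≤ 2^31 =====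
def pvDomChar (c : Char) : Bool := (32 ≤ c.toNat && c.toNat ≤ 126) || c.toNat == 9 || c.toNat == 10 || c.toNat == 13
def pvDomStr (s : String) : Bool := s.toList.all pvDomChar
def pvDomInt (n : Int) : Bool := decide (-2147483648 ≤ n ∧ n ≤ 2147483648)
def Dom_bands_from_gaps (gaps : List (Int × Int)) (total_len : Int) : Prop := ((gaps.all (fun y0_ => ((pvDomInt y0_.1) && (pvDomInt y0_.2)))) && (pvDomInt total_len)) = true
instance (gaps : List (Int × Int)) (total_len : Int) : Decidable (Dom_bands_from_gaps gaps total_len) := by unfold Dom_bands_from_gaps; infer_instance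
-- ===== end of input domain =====

-- ===== PORT A =====
-- Literal port of A: fold threading (bands, prev_end), then the final tail band.
def bands_from_gaps (gaps : List (Int × Int)) (total_len : Int) : List (Int × Int) :=
  let st := gaps.foldl
    (fun (st : List (Int × Int) × Int) g =>
      let bands := if g.1 > st.2 then st.1 ++ [(st.2, g.1)] else st.1
      (bands, g.2))
    ([], 0)
  if st.2 < total_len then st.1 ++ [(st.2, total_len)] else st.1

-- ===== PORT B =====
-- Strided pairing over even indices of the boundary list (B's comprehension).
def pairEvens : List Int → List (Int × Int)
  | a :: b :: rest => (if a < b then [(a, b)] else []) ++ pairEvens rest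
  | _ => []

-- Literal port of B: flat boundary list [0, gs0, ge0, ..., total_len], then one strided pairing pass.
def bands_from_gaps_alt (gaps : List (Int × Int)) (total_len : Int) : List (Int × Int) :=
  pairEvens (0 :: (gaps.flatMap (fun g => [g.1, g.2]) ++ [total_len]))

-- ===== PRECONDITION & SPEC =====
def Spec_bands_from_gaps (gaps : List (Int × Int)) (total_len : Int) (out : List (Int × Int)) : Prop := out = bands_from_gaps_alt gaps total_len
instance (gaps : List (Int × Int)) (total_len : Int) (out : List (Int × Int)) : Decidable (Spec_bands_from_gaps gaps total_len out) := by unfold Spec_bands_from_gaps; infer_instance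

-- ===== CLAIM (what is proved, stated in full; the proofs are below) =====
def Claim_equal_bands_from_gaps : Prop := ∀ (gaps : List (Int × Int)) (total_len : Int), Dom_bands_from_gaps gaps total_len → Spec_bands_from_gaps gaps total_len (bands_from_gaps gaps total_len)

-- ===== LEMMAS AND PROOFS =====
lemma bands_loop (gaps : List (Int × Int)) (total_len prev : Int) (bands : List (Int × Int)) :
    (let st := gaps.foldl
        (fun (st : List (Int × Int) × Int) g =>
          let bs := if g.1 > st.2 then st.1 ++ [(st.2, g.1)] else st.1
          (bs, g.2))
        (bands, prev)
      if st.2 < total_len then st.1 ++ [(st.2, total_len)] else st.1)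
    = bands ++ pairEvens (prev :: (gaps.flatMap (fun g => [g.1, g.2]) ++ [total_len])) := by
  induction gaps generalizing prev bands with
  | nil =>
      simp only [List.foldl_nil, List.flatMap_nil, List.nil_append, pairEvens]
      split_ifs with h <;> simp
  | cons g rest ih =>
      simp only [List.foldl_cons, List.flatMap_cons, List.cons_append, pairEvens]
      rw [ih]
      split_ifs with h
      · simp [List.append_assoc]
      · simp

-- ===== VERDICT (by name: the statement is the Claim_ definition above) =====
theorem bands_from_gaps_spec : Claim_equal_bands_from_gaps := by
  intro gaps total_len _
  show bands_from_gaps gaps total_len = bands_from_gaps_alt gaps total_len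
  unfold bands_from_gaps bands_from_gaps_alt
  exact bands_loop gaps total_len 0 []
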